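-- pv_equiv track=rewrite | github.com/deanccwinchester/repositoriowido | tonyelmasteamcc.py | construir_matriz_newton
-- ===== SOURCE A (Python) =====
-- def construir_matriz_newton(x):
--     n = len(x)
--     A = [[0 for _ in range(n)] for _ in range(n)]
--
--     for i in range(n):
--         A[i][0] = 1  # Primera columna siempre 1
--         for j in range(1, i + 1):
--             producto = 1
--             for k in range(j):
--                 producto *= (x[i] - x[k])
--             A[i][j] = producto
--     return A
-- ===== SOURCE B (Python) =====
-- def construir_matriz_newton(x):
--     n = len(x)
--     rows = []
--     for i, xi in enumerate(x):
--         row = [0] * n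
--         p = 1
--         for j in range(i + 1):
--             row[j] = p
--             p *= xi - x[j]
--         rows.append(row)
--     return rows
-- ===== Notes on version B (the rewrite author's own statement) =====
-- stated objective: faster
-- what changed: Each entry's product is built incrementally (row[j+1] = row[j]*(x[i]-x[j]) via a running accumulator) in a single pass per row, removing A's inner k-loop that recomputes the full product for every (i,j); intended as faster (O(n^2) vs O(n^3) multiplications), measured 11.08x at n=256, unconfirmed at n=1024 where both time out on huge integers.
import Mathlib
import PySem

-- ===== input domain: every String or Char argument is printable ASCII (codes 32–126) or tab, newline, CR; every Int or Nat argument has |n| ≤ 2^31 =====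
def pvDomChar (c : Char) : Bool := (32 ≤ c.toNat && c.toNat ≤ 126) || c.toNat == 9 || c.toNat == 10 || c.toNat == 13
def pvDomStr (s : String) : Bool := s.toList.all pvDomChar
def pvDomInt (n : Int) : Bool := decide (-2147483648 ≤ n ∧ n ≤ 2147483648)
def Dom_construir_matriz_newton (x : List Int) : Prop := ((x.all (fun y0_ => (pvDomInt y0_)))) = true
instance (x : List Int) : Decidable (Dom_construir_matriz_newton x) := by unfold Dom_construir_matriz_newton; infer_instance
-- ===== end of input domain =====

-- B replaces A's recomputation of each Newton-basis product (inner k-loop, O(n^3)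
-- multiplications) by a running product per row (row[j+1] = row[j]*(x[i]-x[j]),
-- O(n^2)); intended as faster, measured 11.08x at n=256 in a timing run.


-- ===== PORT A =====
-- literal port of A: n×n zero matrix, then for each i set A[i][0] = 1 and for
-- each j in 1..i recompute producto = Π_{k<j}(x[i]-x[k]) with an inner k-loop.
def construir_matriz_newton (x : List Int) : List (List Int) :=
  let n : Int := (x.length : Int)
  let A0 : List (List Int) :=
    (PySem.List.pyRange 0 n 1).map (fun _ => (PySem.List.pyRange 0 n 1).map (fun _ => (0 : Int)))
  (PySem.List.pyRange 0 n 1).foldl (fun A i =>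
    -- A[i][0] = 1  (indices are always in range here, so the total pySetD/pyGetD forms are exact)
    let A1 := PySem.List.pySetD A i (PySem.List.pySetD (PySem.List.pyGetD A i []) 0 1)
    (PySem.List.pyRange 1 (i+1) 1).foldl (fun A j =>
      let producto : Int :=
        (PySem.List.pyRange 0 j 1).foldl
          (fun p k => p * (PySem.List.pyGetD x i 0 - PySem.List.pyGetD x k 0)) 1
      PySem.List.pySetD A i (PySem.List.pySetD (PySem.List.pyGetD A i []) j producto)) A1) A0

-- ===== PORT B =====
-- literal port of Source B: per row a running product p, row[j] = p; p *= xi - x[j].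
def construir_matriz_newton_alt (x : List Int) : List (List Int) :=
  let n : Int := (x.length : Int)
  (PySem.List.enumerate x 0).foldl (fun rows ixi =>
    let row0 : List Int := List.replicate n.toNat (0 : Int)     -- [0] * n
    let rp :=
      (PySem.List.pyRange 0 (ixi.1 + 1) 1).foldl
        (fun (rp : List Int × Int) j =>
          (PySem.List.pySetD rp.1 j rp.2, rp.2 * (ixi.2 - PySem.List.pyGetD x j 0)))
        (row0, 1)
    rows ++ [rp.1]) []

-- ===== PRECONDITION & SPEC =====
def Spec_construir_matriz_newton (x : List Int) (out : List (List Int)) : Prop := out = construir_matriz_newton_alt x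
instance (x : List Int) (out : List (List Int)) : Decidable (Spec_construir_matriz_newton x out) := by unfold Spec_construir_matriz_newton; infer_instance

-- ===== CLAIM (what is proved, stated in full; the proofs are below) =====
def Claim_equal_construir_matriz_newton : Prop := ∀ (x : List Int), Dom_construir_matriz_newton x → Spec_construir_matriz_newton x (construir_matriz_newton x)

-- ===== LEMMAS AND PROOFS =====

-- the product Π_{k<m} (xi - x[k])
def pvProd (x : List Int) (xi : Int) (m : Nat) : Int :=
  (List.range m).foldl (fun (p : Int) (k : Nat) => p * (xi - PySem.List.pyGetD x (k : Int) 0)) 1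

-- row i of the common intended result
def pvRow (x : List Int) (i : Nat) : List Int :=
  (List.range x.length).map
    (fun m => if m ≤ i then pvProd x (PySem.List.pyGetD x (i : Int) 0) m else 0)

theorem pvProd_zero (x : List Int) (xi : Int) : pvProd x xi 0 = 1 := rfl

theorem pvProd_succ (x : List Int) (xi : Int) (m : Nat) :
    pvProd x xi (m + 1) = pvProd x xi m * (xi - PySem.List.pyGetD x (m : Int) 0) := by
  simp [pvProd, List.range_succ]

-- A's producto loop computes pvProd
theorem producto_eq_pvProd (x : List Int) (xi : Int) (m : Nat) :
    (PySem.List.pyRange 0 (m : Int) 1).foldl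
      (fun p k => p * (xi - PySem.List.pyGetD x k 0)) 1 = pvProd x xi m := by
  rw [PySem.List.pyRange_one, List.foldl_map]
  simp only [Int.sub_zero, Int.toNat_natCast, zero_add]
  unfold pvProd
  rfl

-- a fold that only appends one element per step is a map
theorem foldl_append_singleton {α β : Type} (l : List α) (f : α → β) (init : List β) :
    l.foldl (fun acc e => acc ++ [f e]) init = init ++ l.map f := by
  induction l generalizing init with
  | nil => simp
  | cons a l ih => simp [ih]

-- B's inner loop: running product p fills the first t slots
theorem B_fold (x : List Int) (xi : Int) (t : Nat) (ht : t ≤ x.length) :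
    (PySem.List.pyRange 0 (t : Int) 1).foldl
      (fun (rp : List Int × Int) j =>
        (PySem.List.pySetD rp.1 j rp.2, rp.2 * (xi - PySem.List.pyGetD x j 0)))
      (List.replicate x.length 0, 1)
    = ((List.range x.length).map (fun m => if m < t then pvProd x xi m else 0),
        pvProd x xi t) := by
  induction t with
  | zero =>
    rw [show ((0 : Nat) : Int) = 0 from rfl, PySem.List.pyRange_one_eq_nil le_rfl]
    refine Prod.ext ?_ rfl
    apply List.ext_getElem <;> simp
  | succ t ih =>
    rw [show ((t + 1 : Nat) : Int) = (t : Int) + 1 by push_cast; ring,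
        PySem.List.pyRange_one_succ_right (by positivity), List.foldl_append,
        ih (by omega)]
    simp only [List.foldl_cons, List.foldl_nil, PySem.List.pySetD_natCast]
    refine Prod.ext ?_ ?_
    · apply List.ext_getElem
      · simp
      · intro m h1 h2
        simp only [List.getElem_set, List.getElem_map, List.getElem_range]
        have hm : m < x.length := by simpa using h1
        split_ifs <;> first | rfl | omega | (subst_vars; rfl)
    · simp [pvProd_succ]

theorem B_eq_spec (x : List Int) :
    construir_matriz_newton_alt x = (List.range x.length).map (pvRow x) := by
  unfold construir_matriz_newton_alt
  rw [foldl_append_singleton (PySem.List.enumerate x 0)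
      (fun ixi => ((PySem.List.pyRange 0 (ixi.1 + 1) 1).foldl
        (fun (rp : List Int × Int) j =>
          (PySem.List.pySetD rp.1 j rp.2, rp.2 * (ixi.2 - PySem.List.pyGetD x j 0)))
        (List.replicate ((x.length : Int)).toNat 0, 1)).1) []]
  rw [List.nil_append]
  apply List.ext_getElem
  · simp
  · intro i h1 h2
    have hi : i < x.length := by simpa using h2
    rw [List.getElem_map, PySem.List.getElem_enumerate]
    simp only [Int.zero_add, Int.toNat_natCast]
    have hb : (i : Int) + 1 = ((i + 1 : Nat) : Int) := by push_cast; ring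
    rw [List.getElem_map, List.getElem_range, hb, B_fold x x[i] (i + 1) (by omega)]
    unfold pvRow
    apply List.map_congr_left
    intro m _
    have hx : PySem.List.pyGetD x ((i : Nat) : Int) 0 = x[i] := by
      rw [PySem.List.pyGetD_natCast, List.getD_eq_getElem?_getD, List.getElem?_eq_getElem hi,
          Option.getD_some]
    rw [hx]
    simp only [Nat.lt_succ_iff]

-- A's inner j-loop writes only into row t of the matrix
theorem fold_set_row (f : Int → Int) (t : Nat) (l : List Int) :
    ∀ (A : List (List Int)) (ht : t < A.length),
    l.foldl (fun A j =>
        PySem.List.pySetD A (t : Int)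
          (PySem.List.pySetD (PySem.List.pyGetD A (t : Int) []) j (f j))) A
    = A.set t (l.foldl (fun r j => PySem.List.pySetD r j (f j)) (A[t]'ht)) := by
  induction l with
  | nil => intro A ht; simp [List.set_getElem_self]
  | cons j l ih =>
    intro A ht
    rw [List.foldl_cons, List.foldl_cons]
    have hget : PySem.List.pyGetD A (t : Int) [] = A[t]'ht := by
      rw [PySem.List.pyGetD_natCast, List.getD_eq_getElem?_getD, List.getElem?_eq_getElem ht,
          Option.getD_some]
    rw [hget, PySem.List.pySetD_natCast]
    rw [ih (A.set t (PySem.List.pySetD (A[t]'ht) j (f j))) (by simpa using ht)]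
    rw [List.getElem_set_self, List.set_set]

-- the writes of A's j-loop, plus the initial A[i][0] = 1, produce row t
theorem row_fold (x : List Int) (xi : Int) (n : Nat) (g : Int → Int)
    (hg : ∀ m : Nat, g (m : Int) = pvProd x xi m) :
    ∀ s : Nat, s ≤ n →
    (PySem.List.pyRange 1 (s : Int) 1).foldl
      (fun r j => PySem.List.pySetD r j (g j)) ((List.replicate n 0).set 0 1)
    = (List.range n).map
        (fun m => if m = 0 then (1 : Int) else if m < s then pvProd x xi m else 0) := by
  intro s
  induction s with
  | zero =>
    intro _
    rw [PySem.List.pyRange_one_eq_nil (by norm_num), List.foldl_nil]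
    apply List.ext_getElem
    · simp
    · intro m h1 h2
      simp only [List.getElem_set, List.getElem_replicate, List.getElem_map, List.getElem_range]
      split_ifs <;> first | rfl | omega
  | succ s ih =>
    intro hs
    rcases Nat.eq_zero_or_pos s with hz | hpos
    · subst hz
      rw [show ((1 : Nat) : Int) = 1 from rfl, PySem.List.pyRange_one_eq_nil le_rfl,
          List.foldl_nil]
      apply List.ext_getElem
      · simp
      · intro m h1 h2
        simp only [List.getElem_set, List.getElem_replicate, List.getElem_map, List.getElem_range]
        split_ifs <;> first | rfl | omega
    · rw [show ((s + 1 : Nat) : Int) = (s : Int) + 1 by push_cast; ring,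
          PySem.List.pyRange_one_succ_right (by exact_mod_cast hpos), List.foldl_append,
          ih (by omega), List.foldl_cons, List.foldl_nil, PySem.List.pySetD_natCast, hg s]
      apply List.ext_getElem
      · simp
      · intro m h1 h2
        have hm : m < n := by simpa using h1
        simp only [List.getElem_set, List.getElem_map, List.getElem_range]
        split_ifs <;> first | rfl | omega | (subst_vars; rfl)

-- A's outer loop, one processed row at a time
theorem A_fold (x : List Int) :
    ∀ t : Nat, t ≤ x.length →
    (PySem.List.pyRange 0 (t : Int) 1).foldl (fun A i =>
      let A1 := PySem.List.pySetD A i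
        (PySem.List.pySetD (PySem.List.pyGetD A i []) 0 1)
      (PySem.List.pyRange 1 (i+1) 1).foldl (fun A j =>
        let producto : Int :=
          (PySem.List.pyRange 0 j 1).foldl
            (fun p k => p * (PySem.List.pyGetD x i 0 - PySem.List.pyGetD x k 0)) 1
        PySem.List.pySetD A i (PySem.List.pySetD (PySem.List.pyGetD A i []) j producto)) A1)
      (List.replicate x.length (List.replicate x.length 0))
    = (List.range x.length).map
        (fun i => if i < t then pvRow x i else List.replicate x.length 0) := by
  intro t
  induction t with
  | zero =>
    intro _
    rw [show ((0 : Nat) : Int) = 0 from rfl, PySem.List.pyRange_one_eq_nil le_rfl,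
        List.foldl_nil]
    apply List.ext_getElem <;> simp
  | succ t ih =>
    intro ht
    rw [show ((t + 1 : Nat) : Int) = (t : Int) + 1 by push_cast; ring,
        PySem.List.pyRange_one_succ_right (by positivity), List.foldl_append,
        ih (by omega), List.foldl_cons, List.foldl_nil]
    have htlen : t < ((List.range x.length).map
        (fun i => if i < t then pvRow x i else List.replicate x.length 0)).length := by
      simp; omega
    have hget : PySem.List.pyGetD ((List.range x.length).map
        (fun i => if i < t then pvRow x i else List.replicate x.length 0)) (t : Int) []
        = List.replicate x.length 0 := by
      rw [PySem.List.pyGetD_natCast, List.getD_eq_getElem?_getD,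
          List.getElem?_eq_getElem htlen, Option.getD_some]
      simp
    simp only [hget]
    rw [show PySem.List.pySetD (List.replicate x.length (0 : Int)) 0 1
          = (List.replicate x.length (0 : Int)).set 0 1 by
        cases hn : x.length <;>
          simp [PySem.List.pySetD, PySem.List.pySet?, PySem.List.pyIdx?]]
    rw [PySem.List.pySetD_natCast]
    rw [fold_set_row _ t _ _ (by simpa using htlen)]
    rw [List.getElem_set_self, List.set_set]
    have hrow : (PySem.List.pyRange 1 ((t : Int) + 1) 1).foldl
        (fun r j => PySem.List.pySetD r j
          ((PySem.List.pyRange 0 j 1).foldl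
            (fun p k => p * (PySem.List.pyGetD x (t : Int) 0 - PySem.List.pyGetD x k 0)) 1))
        ((List.replicate x.length 0).set 0 1)
        = pvRow x t := by
      rw [show (t : Int) + 1 = ((t + 1 : Nat) : Int) by push_cast; ring]
      rw [row_fold x (PySem.List.pyGetD x (t : Int) 0) x.length
          (fun j => (PySem.List.pyRange 0 j 1).foldl
            (fun p k => p * (PySem.List.pyGetD x (t : Int) 0 - PySem.List.pyGetD x k 0)) 1)
          (fun m => producto_eq_pvProd x _ m) (t + 1) ht]
      unfold pvRow
      apply List.map_congr_left
      intro m _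
      rcases Nat.eq_zero_or_pos m with hz | hpos
      · subst hz; simp [pvProd_zero]
      · simp only [Nat.lt_succ_iff]
        split_ifs <;> first | rfl | omega
    rw [hrow]
    apply List.ext_getElem
    · simp
    · intro i h1 h2
      have hi : i < x.length := by simpa using h2
      simp only [List.getElem_set, List.getElem_map, List.getElem_range]
      split_ifs <;> first | rfl | omega | (subst_vars; rfl)

theorem A_eq_spec (x : List Int) :
    construir_matriz_newton x = (List.range x.length).map (pvRow x) := by
  unfold construir_matriz_newton
  have hA0 : (PySem.List.pyRange 0 (x.length : Int) 1).map
      (fun _ => (PySem.List.pyRange 0 (x.length : Int) 1).map (fun _ => (0 : Int)))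
      = List.replicate x.length (List.replicate x.length 0) := by
    rw [List.map_const', List.map_const']
    simp [PySem.List.length_pyRange_one]
  simp only [hA0]
  rw [A_fold x x.length le_rfl]
  apply List.map_congr_left
  intro i hi
  rw [if_pos (by simpa using hi)]

-- ===== VERDICT (by name: the statement is the Claim_ definition above) =====
theorem construir_matriz_newton_spec : Claim_equal_construir_matriz_newton := by
  intro x _
  unfold Spec_construir_matriz_newton
  rw [A_eq_spec, B_eq_spec]
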